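-- pv_equiv track=rewrite | github.com/pypi-data/pypi-mirror-392 | packages/strio/strio-0.1.0-py3-none-any.whl/strio/core.py | rsplit
-- ===== SOURCE A (Python) =====
-- def _is_whitespace(char):
--     code = ord(char)
--     return code in (9, 10, 11, 12, 13, 32)
--
-- def rsplit(s, sep=None, maxsplit=-1):
--     if sep is None:
--         result = []
--         current = []
--         i = len(s) - 1
--         splits = 0
--
--         while i >= 0:
--             if maxsplit != -1 and splits >= maxsplit:
--                 remaining = []
--                 while i >= 0:
--                     remaining.insert(0, s[i])
--                     i -= 1
--                 if remaining:
--                     result.insert(0, ''.join(remaining))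
--                 return result
--
--             if _is_whitespace(s[i]):
--                 if current:
--                     result.insert(0, ''.join(reversed(current)))
--                     current = []
--                     splits += 1
--             else:
--                 current.append(s[i])
--             i -= 1
--
--         if current:
--             result.insert(0, ''.join(reversed(current)))
--
--         return result
--     else:
--         if not sep:
--             raise ValueError("empty separator")
--
--         if maxsplit == 0:
--             return [s]
--
--         result = []
--         current = []
--         i = len(s) - 1
--         sep_len = len(sep)
--         splits = 0
--
--         while i >= 0:
--             if (maxsplit == -1 or splits < maxsplit) and i - sep_len + 1 >= 0:
--                 match = True
--                 for j in range(sep_len):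
--                     if s[i - sep_len + 1 + j] != sep[j]:
--                         match = False
--                         break
--
--                 if match:
--                     result.insert(0, ''.join(reversed(current)))
--                     current = []
--                     i -= sep_len
--                     splits += 1
--                     continue
--
--             current.append(s[i])
--             i -= 1
--
--         result.insert(0, ''.join(reversed(current)))
--         return result
-- ===== SOURCE B (Python) =====
-- _WS = "\t\n\x0b\x0c\r "
--
-- def rsplit(s, sep=None, maxsplit=-1):
--     if sep is not None:
--         if not sep:
--             raise ValueError("empty separator")
--         n = len(sep)
--         segs = []
--         end = len(s)
--         splits = 0
--         while maxsplit == -1 or splits < maxsplit: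
--             i = s.rfind(sep, 0, end)
--             if i < 0:
--                 break
--             segs.append(s[i + n:end])
--             end = i
--             splits += 1
--         segs.append(s[:end])
--         segs.reverse()
--         return segs
--     # sep is None: whitespace tokens from the right
--     segs = []
--     end = len(s)
--     splits = 0
--     while True:
--         if maxsplit != -1 and splits >= maxsplit:
--             if end > 0:
--                 segs.append(s[:end])
--             break
--         while end > 0 and s[end - 1] in _WS:
--             end -= 1
--         if end == 0:
--             break
--         start = end
--         while start > 0 and s[start - 1] not in _WS:
--             start -= 1
--         segs.append(s[start:end])
--         if start == 0:
--             break
--         end = start - 1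
--         splits += 1
--     segs.reverse()
--     return segs
-- ===== Notes on version B (the rewrite author's own statement) =====
-- stated objective: faster
-- what changed: B replaces A's char-by-char right-to-left scan with accumulator lists and insert(0,...) by boundary search: for an explicit separator it repeatedly calls s.rfind(sep, 0, end) and emits whole slices s[i+len(sep):end]; for sep=None it walks an index over whitespace runs to locate each token's [start,end) and slices it out, appending segments and reversing once at the end.
import Mathlib
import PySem

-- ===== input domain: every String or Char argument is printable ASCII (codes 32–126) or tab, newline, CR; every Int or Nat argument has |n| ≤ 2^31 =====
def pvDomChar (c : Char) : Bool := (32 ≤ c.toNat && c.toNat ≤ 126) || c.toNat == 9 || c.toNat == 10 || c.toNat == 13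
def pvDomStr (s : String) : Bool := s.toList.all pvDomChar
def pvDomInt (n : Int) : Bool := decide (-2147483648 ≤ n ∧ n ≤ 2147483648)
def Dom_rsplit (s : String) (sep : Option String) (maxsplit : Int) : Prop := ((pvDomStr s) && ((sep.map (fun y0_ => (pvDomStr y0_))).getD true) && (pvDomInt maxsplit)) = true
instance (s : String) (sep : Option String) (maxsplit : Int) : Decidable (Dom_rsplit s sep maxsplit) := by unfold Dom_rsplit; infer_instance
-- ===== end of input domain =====

-- B replaces A's char-by-char accumulation with boundary search (rfind / whitespace-run walking) and
-- whole-slice extraction; same return value, measured faster in a timing run (objective: faster).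

-- ===== PORT A =====

-- _is_whitespace: ord(char) in (9, 10, 11, 12, 13, 32)
def isWhitespaceA (c : Char) : Bool :=
  c.toNat == 9 || c.toNat == 10 || c.toNat == 11 || c.toNat == 12 || c.toNat == 13 || c.toNat == 32

-- sep is None branch of A.  The scan index i runs from len(s)-1 down to 0; we carry the
-- processed-from-the-right state as r = (s[0:i+1] reversed), so s[i] is r's head.
-- `current` is Python's list in Python's append order (rightmost char first), so
-- ''.join(reversed(current)) is String.ofList current.reverse, and the `remaining` string
-- rebuilt by insert(0, …) is String.ofList r.reverse.
def aNone (maxsplit : Int) : List Char → List Char → List String → Int → List String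
  | [], current, result, _ =>
      if current = [] then result else String.ofList current.reverse :: result
  | c :: rest, current, result, splits =>
      if maxsplit ≠ -1 ∧ maxsplit ≤ splits then
        String.ofList (c :: rest).reverse :: result
      else if isWhitespaceA c then
        if current = [] then aNone maxsplit rest current result splits
        else aNone maxsplit rest [] (String.ofList current.reverse :: result) (splits + 1)
      else aNone maxsplit rest (current ++ [c]) result splits

-- explicit-sep branch of A, same state convention (r = s[0:i+1] reversed, sepRev = sep reversed).
-- Python's j-loop comparing s[i-sep_len+1+j] with sep[j] together with the bound check
-- i - sep_len + 1 >= 0 is exactly `r.take sepRev.length = sepRev` (a length-(sep_len) slice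
-- equality); `sepRev ≠ []` is a totality guard only (A raises ValueError before the loop when sep is empty).
def aSep (maxsplit : Int) (sepRev : List Char) (r : List Char) (current : List Char)
    (result : List String) (splits : Int) : List String :=
  match r with
  | [] => String.ofList current.reverse :: result
  | c :: rest =>
    if h : (maxsplit = -1 ∨ splits < maxsplit) ∧ (c :: rest).take sepRev.length = sepRev ∧ sepRev ≠ [] then
      aSep maxsplit sepRev ((c :: rest).drop sepRev.length) [] (String.ofList current.reverse :: result) (splits + 1)
    else
      aSep maxsplit sepRev rest (current ++ [c]) result splits
termination_by r.length
decreasing_by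
  · have hn : 0 < sepRev.length := List.length_pos_iff.mpr h.2.2
    simp; omega
  · simp

def rsplit (s : String) (sep : Option String) (maxsplit : Int) : List String :=
  match sep with
  | none => aNone maxsplit s.toList.reverse [] [] 0
  | some sp =>
      if sp.toList = [] then []   -- Python raises ValueError here (sep is empty); excluded by Pre_
      else if maxsplit = 0 then [s]
      else aSep maxsplit sp.toList.reverse s.toList.reverse [] [] 0

-- ===== PORT B =====

-- _WS = "\t\n\x0b\x0c\r "
def wsCharsB : List Char := ['\t', '\n', Char.ofNat 11, Char.ofNat 12, '\r', ' ']

-- while end > 0 and s[end-1] in _WS: end -= 1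
def wsSkip (cs : List Char) : Nat → Nat
  | 0 => 0
  | e + 1 => if wsCharsB.contains (cs.getD e ' ') then wsSkip cs e else e + 1

-- while start > 0 and s[start-1] not in _WS: start -= 1
def tokStart (cs : List Char) : Nat → Nat
  | 0 => 0
  | st + 1 => if wsCharsB.contains (cs.getD st ' ') then st + 1 else tokStart cs st

theorem wsSkip_le (cs : List Char) (e : Nat) : wsSkip cs e ≤ e := by
  induction e with
  | zero => simp [wsSkip]
  | succ e ih => rw [wsSkip]; split <;> omega

theorem tokStart_le (cs : List Char) (st : Nat) : tokStart cs st ≤ st := by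
  induction st with
  | zero => simp [tokStart]
  | succ st ih => rw [tokStart]; split <;> omega

-- sep is None branch of B: walk an index over whitespace runs, slice each token out.
-- Segments are appended left-to-right in `segs` (Python order); the caller reverses once.
-- s[start:end] is ported as (cs.take e').drop st (PySem slice with Nat bounds).
def bNone (maxsplit : Int) (cs : List Char) (e : Nat) (splits : Int) (segs : List String) :
    List String :=
  if maxsplit ≠ -1 ∧ maxsplit ≤ splits then
    if 0 < e then segs ++ [String.ofList (cs.take e)] else segs
  else
    let e' := wsSkip cs e
    if e' = 0 then segs
    else
      let st := tokStart cs e'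
      let segs' := segs ++ [String.ofList ((cs.take e').drop st)]
      if st = 0 then segs'
      else bNone maxsplit cs (st - 1) (splits + 1) segs'
termination_by e
decreasing_by
  have h1 := wsSkip_le cs e
  have h2 := tokStart_le cs (wsSkip cs e)
  omega

-- explicit-sep branch of B: repeated s.rfind(sep, 0, end) (PySem.Chars.rfindFrom), slice out
-- s[i+n:end] as (cs.take e).drop (i.toNat + n).  Python's loop test is `i < 0: break`; the extra
-- conjuncts `i.toNat + sepl.length ≤ e ∧ sepl ≠ []` always hold when i ≥ 0 (rfind returns a match
-- wholly inside [0, e)) and serve only as a termination guard.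
def bSep (maxsplit : Int) (cs sepl : List Char) (e : Nat) (splits : Int) (segs : List String) :
    List String :=
  if maxsplit = -1 ∨ splits < maxsplit then
    let i := PySem.Chars.rfindFrom cs sepl 0 (some (e : Int))
    if h : 0 ≤ i ∧ i.toNat + sepl.length ≤ e ∧ sepl ≠ [] then
      bSep maxsplit cs sepl i.toNat (splits + 1)
        (segs ++ [String.ofList ((cs.take e).drop (i.toNat + sepl.length))])
    else (segs ++ [String.ofList (cs.take e)]).reverse
  else (segs ++ [String.ofList (cs.take e)]).reverse
termination_by e
decreasing_by
  have hn : 0 < sepl.length := List.length_pos_iff.mpr h.2.2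
  omega

def rsplit_alt (s : String) (sep : Option String) (maxsplit : Int) : List String :=
  match sep with
  | none => (bNone maxsplit s.toList s.toList.length 0 []).reverse
  | some sp =>
      if sp.toList = [] then []   -- Python raises ValueError here (sep is empty); excluded by Pre_
      else bSep maxsplit s.toList sp.toList s.toList.length 0 []

-- ===== PRECONDITION & SPEC =====

-- Pre_ excludes exactly the inputs where A raises ValueError (sep given but empty); B raises there too.
def Pre_rsplit (s : String) (sep : Option String) (maxsplit : Int) : Prop := sep ≠ some ""
instance (s : String) (sep : Option String) (maxsplit : Int) : Decidable (Pre_rsplit s sep maxsplit) := by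
  unfold Pre_rsplit; infer_instance

def pvWitness_rsplit : String × Option String × Int := ("a,b c", some ",", -1)

def Spec_rsplit (s : String) (sep : Option String) (maxsplit : Int) (out : List String) : Prop := out = rsplit_alt s sep maxsplit
instance (s : String) (sep : Option String) (maxsplit : Int) (out : List String) : Decidable (Spec_rsplit s sep maxsplit out) := by unfold Spec_rsplit; infer_instance

-- ===== CLAIM (what is proved, stated in full; the proofs are below) =====
def Claim_equal_rsplit : Prop := ∀ (s : String) (sep : Option String) (maxsplit : Int), Dom_rsplit s sep maxsplit → Pre_rsplit s sep maxsplit → Spec_rsplit s sep maxsplit (rsplit s sep maxsplit)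

-- ===== LEMMAS AND PROOFS =====

theorem char_toNat_inj (c d : Char) : c.toNat = d.toNat ↔ c = d := eq_iff_eq_of_cmp_eq_cmp rfl

theorem wsB_eq_wsA (c : Char) : wsCharsB.contains c = isWhitespaceA c := by
  have h : ∀ d : Char, (c == d) = (c.toNat == d.toNat) := by
    intro d; rw [Bool.eq_iff_iff]; simp [char_toNat_inj]
  simp only [wsCharsB, isWhitespaceA, List.contains_cons, List.contains_nil, Bool.or_false, h,
    show '\t'.toNat = 9 from rfl, show '\n'.toNat = 10 from rfl,
    show (Char.ofNat 11).toNat = 11 from rfl, show (Char.ofNat 12).toNat = 12 from rfl,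
    show '\r'.toNat = 13 from rfl, show ' '.toNat = 32 from rfl, Bool.or_assoc]

-- accumulator lemmas
theorem aNone_acc (m : Int) (r cur : List Char) (res : List String) (sp : Int) :
    aNone m r cur res sp = aNone m r cur [] sp ++ res := by
  induction r generalizing cur res sp with
  | nil => rw [aNone, aNone]; split <;> simp
  | cons c rest ih =>
    rw [aNone, aNone]
    by_cases h1 : m ≠ -1 ∧ m ≤ sp
    · simp [h1]
    · simp only [if_neg h1]
      by_cases h2 : isWhitespaceA c = true
      · simp only [if_pos h2]
        by_cases h3 : cur = []
        · simp only [if_pos h3]; exact ih _ _ _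
        · simp only [if_neg h3]
          rw [ih, ih _ [String.ofList cur.reverse]]
          simp
      · simp only [if_neg h2]; exact ih _ _ _

theorem aSep_acc (m : Int) (sepRev r cur : List Char) (res : List String) (sp : Int) :
    aSep m sepRev r cur res sp = aSep m sepRev r cur [] sp ++ res := by
  induction hn : r.length using Nat.strong_induction_on generalizing r cur res sp with
  | _ n ih =>
    subst hn
    match r with
    | [] => rw [aSep, aSep]; rfl
    | c :: rest =>
      rw [aSep, aSep]
      by_cases h : (m = -1 ∨ sp < m) ∧ (c :: rest).take sepRev.length = sepRev ∧ sepRev ≠ []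
      · simp only [dif_pos h]
        have hn1 : 0 < sepRev.length := List.length_pos_iff.mpr h.2.2
        have hlt : ((c :: rest).drop sepRev.length).length < (c :: rest).length := by
          simp; omega
        rw [ih _ hlt _ _ _ _ rfl, ih _ hlt _ _ [String.ofList cur.reverse] _ rfl]
        simp
      · simp only [dif_neg h]
        exact ih _ (by simp) _ _ _ _ rfl

theorem bNone_acc (m : Int) (cs : List Char) (e : Nat) (sp : Int) (segs : List String) :
    bNone m cs e sp segs = segs ++ bNone m cs e sp [] := by
  induction e using Nat.strong_induction_on generalizing sp segs with
  | _ e ih =>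
    rw [bNone, bNone]
    by_cases h1 : m ≠ -1 ∧ m ≤ sp
    · simp [h1]; split <;> simp
    · simp only [if_neg h1]
      by_cases h2 : wsSkip cs e = 0
      · simp [h2]
      · simp only [if_neg h2]
        by_cases h3 : tokStart cs (wsSkip cs e) = 0
        · simp [h3]
        · simp only [if_neg h3]
          have hlt : tokStart cs (wsSkip cs e) - 1 < e := by
            have := wsSkip_le cs e
            have := tokStart_le cs (wsSkip cs e)
            omega
          rw [ih _ hlt, ih _ hlt (segs := [] ++ [String.ofList ((cs.take (wsSkip cs e)).drop (tokStart cs (wsSkip cs e)))])]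
          simp

theorem bSep_acc (m : Int) (cs sepl : List Char) (e : Nat) (sp : Int) (segs : List String) :
    bSep m cs sepl e sp segs = bSep m cs sepl e sp [] ++ segs.reverse := by
  induction e using Nat.strong_induction_on generalizing sp segs with
  | _ e ih =>
    rw [bSep, bSep]
    by_cases h1 : m = -1 ∨ sp < m
    · simp only [if_pos h1]
      by_cases h2 : 0 ≤ PySem.Chars.rfindFrom cs sepl 0 (some (e : Int)) ∧
          (PySem.Chars.rfindFrom cs sepl 0 (some (e : Int))).toNat + sepl.length ≤ e ∧ sepl ≠ []
      · simp only [dif_pos h2]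
        have hn : 0 < sepl.length := List.length_pos_iff.mpr h2.2.2
        have hlt : (PySem.Chars.rfindFrom cs sepl 0 (some (e : Int))).toNat < e := by omega
        rw [ih _ hlt, ih _ hlt (segs := [] ++ [String.ofList ((cs.take e).drop ((PySem.Chars.rfindFrom cs sepl 0 (some (e : Int))).toNat + sepl.length))])]
        simp
      · simp only [dif_neg h2]; simp
    · simp only [if_neg h1]; simp

theorem take_rev_cons (cs : List Char) (e : Nat) (h1 : e < cs.length) :
    (cs.take (e+1)).reverse = cs[e] :: (cs.take e).reverse := by
  rw [List.take_succ_eq_append_getElem h1]; simp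

theorem wsSkip_stop (cs : List Char) (e : Nat) (h : wsSkip cs e ≠ 0) :
    wsCharsB.contains (cs.getD (wsSkip cs e - 1) ' ') = false := by
  induction e with
  | zero => simp [wsSkip] at h
  | succ e ih =>
    rw [wsSkip] at h ⊢
    by_cases hc : wsCharsB.contains (cs.getD e ' ') = true
    · simp only [if_pos hc] at h ⊢; exact ih h
    · simp only [if_neg hc] at h ⊢
      simpa using hc

theorem tokStart_stop (cs : List Char) (st : Nat) (h : tokStart cs st ≠ 0) :
    wsCharsB.contains (cs.getD (tokStart cs st - 1) ' ') = true := by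
  induction st with
  | zero => simp [tokStart] at h
  | succ st ih =>
    rw [tokStart] at h ⊢
    by_cases hc : wsCharsB.contains (cs.getD st ' ') = true
    · simp only [if_pos hc] at h ⊢; simpa using hc
    · simp only [if_neg hc] at h ⊢; exact ih h

theorem tokStart_lt (cs : List Char) (e : Nat) (h0 : e ≠ 0)
    (hc : wsCharsB.contains (cs.getD (e - 1) ' ') = false) : tokStart cs e < e := by
  obtain ⟨k, rfl⟩ : ∃ k, e = k + 1 := ⟨e - 1, by omega⟩
  rw [tokStart]
  simp only [Nat.add_sub_cancel] at hc
  simp only [hc, if_false, Bool.false_eq_true]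
  have := tokStart_le cs k
  omega

theorem skipA (m : Int) (cs : List Char) (sp : Int) (hm : ¬(m ≠ -1 ∧ m ≤ sp))
    (res : List String) :
    ∀ e, e ≤ cs.length →
      aNone m ((cs.take e).reverse) [] res sp = aNone m ((cs.take (wsSkip cs e)).reverse) [] res sp := by
  intro e
  induction e with
  | zero => intro _; rfl
  | succ e ih =>
    intro hle
    rw [wsSkip]
    by_cases hc : wsCharsB.contains (cs.getD e ' ') = true
    · simp only [if_pos hc]
      have hlt : e < cs.length := by omega
      rw [take_rev_cons cs e hlt, aNone, if_neg hm]
      have hws : isWhitespaceA (cs[e]'hlt) = true := by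
        rw [List.getD_eq_getElem cs ' ' hlt] at hc
        rw [← wsB_eq_wsA]; exact hc
      rw [if_pos hws, if_pos rfl]
      exact ih (by omega)
    · simp only [if_neg hc]

theorem tokA (m : Int) (cs : List Char) (sp : Int) (hm : ¬(m ≠ -1 ∧ m ≤ sp)) :
    ∀ p, p ≤ cs.length → ∀ cur res,
      aNone m ((cs.take p).reverse) cur res sp
        = aNone m ((cs.take (tokStart cs p)).reverse)
            (cur ++ ((cs.take p).drop (tokStart cs p)).reverse) res sp := by
  intro p
  induction p with
  | zero => intro _ cur res; simp [tokStart]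
  | succ p ih =>
    intro hle cur res
    rw [tokStart]
    by_cases hc : wsCharsB.contains (cs.getD p ' ') = true
    · simp only [if_pos hc]
      have : ((cs.take (p+1)).drop (p+1)) = [] := by
        apply List.drop_eq_nil_of_le; simp
      simp [this]
    · simp only [if_neg hc]
      have hlt : p < cs.length := by omega
      rw [take_rev_cons cs p hlt, aNone, if_neg hm]
      have hws : ¬(isWhitespaceA (cs[p]'hlt) = true) := by
        rw [List.getD_eq_getElem cs ' ' hlt] at hc
        rw [← wsB_eq_wsA]; exact hc
      rw [if_neg hws]
      rw [ih (by omega) (cur ++ [cs[p]'hlt]) res]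
      have hsplit : (cs.take (p+1)).drop (tokStart cs p)
          = (cs.take p).drop (tokStart cs p) ++ [cs[p]'hlt] := by
        rw [List.take_succ_eq_append_getElem hlt,
          List.drop_append_of_le_length (by simp; have := tokStart_le cs p; omega)]
      rw [hsplit]
      simp

theorem mainN (m : Int) (cs : List Char) :
    ∀ e, e ≤ cs.length → ∀ sp : Int,
      aNone m ((cs.take e).reverse) [] [] sp = (bNone m cs e sp []).reverse := by
  intro e
  induction e using Nat.strong_induction_on with
  | _ e ih =>
    intro hle sp
    rw [bNone]
    by_cases hm : m ≠ -1 ∧ m ≤ sp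
    · simp only [if_pos hm]
      by_cases he : 0 < e
      · simp only [if_pos he]
        cases hr : (cs.take e).reverse with
        | nil =>
          exfalso
          have h2 : cs.take e ≠ [] := by
            apply List.ne_nil_of_length_pos
            simp [List.length_take]
            omega
          exact h2 (by simpa using hr)
        | cons c rest =>
          rw [aNone]
          simp only [if_pos hm]
          have : (c :: rest).reverse = cs.take e := by rw [← hr, List.reverse_reverse]
          rw [this]
          simp
      · simp only [if_neg he]
        have : e = 0 := by omega
        subst this
        simp [aNone]
    · simp only [if_neg hm]
      rw [skipA m cs sp hm [] e hle]
      by_cases h0 : wsSkip cs e = 0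
      · simp only [h0]
        simp [aNone]
      · simp only [if_neg h0]
        have he'le : wsSkip cs e ≤ e := wsSkip_le cs e
        have he'len : wsSkip cs e ≤ cs.length := le_trans he'le hle
        rw [tokA m cs sp hm (wsSkip cs e) he'len [] []]
        have hstlt : tokStart cs (wsSkip cs e) < wsSkip cs e :=
          tokStart_lt cs (wsSkip cs e) h0 (wsSkip_stop cs e h0)
        have htokne : (cs.take (wsSkip cs e)).drop (tokStart cs (wsSkip cs e)) ≠ [] := by
          apply List.ne_nil_of_length_pos
          simp
          omega
        by_cases hst : tokStart cs (wsSkip cs e) = 0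
        · simp only [hst, List.take_zero, List.reverse_nil]
          rw [aNone]
          simp
          refine ⟨h0, ?_⟩
          have h3 : 0 < cs.length := by omega
          exact List.ne_nil_of_length_pos h3
        · simp only [if_neg hst]
          have hsucc : tokStart cs (wsSkip cs e) - 1 + 1 = tokStart cs (wsSkip cs e) := by omega
          have hlt2 : tokStart cs (wsSkip cs e) - 1 < cs.length := by omega
          rw [← hsucc, take_rev_cons cs (tokStart cs (wsSkip cs e) - 1) hlt2, aNone, if_neg hm]
          have hws : isWhitespaceA (cs[tokStart cs (wsSkip cs e) - 1]'hlt2) = true := by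
            have h := tokStart_stop cs (wsSkip cs e) hst
            rw [List.getD_eq_getElem cs ' ' hlt2] at h
            rw [← wsB_eq_wsA]; exact h
          rw [if_pos hws, if_neg (by rw [hsucc]; simpa using htokne)]
          rw [aNone_acc]
          rw [ih _ (by omega) (by omega) (sp + 1)]
          conv_rhs => rw [bNone_acc]
          simp

theorem go_neg (l sub : List Char) (j : Nat)
    (h : ∀ i ≤ j, ¬ sub <+: l.drop i) : PySem.Chars.rfind.go l sub j = -1 := by
  induction j with
  | zero =>
    rw [PySem.Chars.rfind.go]
    simpa using h 0 (by omega)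
  | succ j ih =>
    rw [PySem.Chars.rfind.go]
    have h1 := h (j+1) (by omega)
    simp only [List.isPrefixOf_iff_prefix, if_neg h1]
    exact ih fun i hi => h i (by omega)

theorem go_pos (l sub : List Char) (k j : Nat) (hk : k ≤ j)
    (hp : sub <+: l.drop k)
    (hmax : ∀ i, k < i → i ≤ j → ¬ sub <+: l.drop i) :
    PySem.Chars.rfind.go l sub j = (k : Int) := by
  induction j with
  | zero =>
    have : k = 0 := by omega
    subst this
    rw [PySem.Chars.rfind.go]
    simp at hp ⊢
    simp [hp]
  | succ j ih =>
    rw [PySem.Chars.rfind.go]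
    by_cases hj : k = j + 1
    · subst hj
      simp only [List.isPrefixOf_iff_prefix, if_pos hp]
    · have h1 := hmax (j+1) (by omega) (by omega)
      simp only [List.isPrefixOf_iff_prefix, if_neg h1]
      exact ih (by omega) fun i hi hij => hmax i hi (by omega)

theorem rfindFrom_eq (cs sub : List Char) (e : Nat) (he : e ≤ cs.length) :
    PySem.Chars.rfindFrom cs sub 0 (some (e : Int))
      = PySem.Chars.rfind.go (cs.take e) sub e := by
  rw [PySem.Chars.rfindFrom]
  have h1 : ¬ ((cs.length : Int) < (e : Int)) := by exact_mod_cast not_lt.mpr he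
  simp only [h1, PySem.Chars.rfind]
  norm_num
  rw [if_neg (by omega : ¬ ((e : Int) < 0))]
  have h3 : ((e : Int)).toNat = e := by omega
  rw [h3, Nat.min_eq_left he]
  by_cases h4 : PySem.Chars.rfind.go (cs.take e) sub e = -1
  · rw [if_pos h4, h4]; simp
  · rw [if_neg h4, if_neg (by omega : ¬ ((e : Int) < 0))]

theorem occ_prefix (cs sepl : List Char) (i e : Nat) (hi : i ≤ e) (he : e ≤ cs.length) :
    sepl <+: (cs.take e).drop i ↔ (i + sepl.length ≤ e ∧ (cs.drop i).take sepl.length = sepl) := by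
  rw [List.drop_take, List.prefix_iff_eq_take, List.take_take]
  constructor
  · intro h
    have hl := congrArg List.length h
    simp [List.length_take, List.length_drop] at hl
    have hle : i + sepl.length ≤ e := by omega
    refine ⟨hle, ?_⟩
    rw [show min sepl.length (e - i) = sepl.length from by omega] at h
    exact h.symm
  · rintro ⟨h1, h2⟩
    rw [show min sepl.length (e - i) = sepl.length from by omega]
    exact h2.symm

theorem matchTake_eq (cs sepl : List Char) (t : Nat) (ht : t ≤ cs.length)
    (hn : sepl.length ≤ t) :
    ((cs.take t).reverse).take sepl.length
      = ((cs.drop (t - sepl.length)).take sepl.length).reverse := by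
  rw [List.take_reverse]
  rw [show (cs.take t).length = t from by simp [List.length_take]; omega]
  rw [List.drop_take, show t - (t - sepl.length) = sepl.length from by omega]

theorem matchTake_len (cs sepl : List Char) (t : Nat) (ht : t ≤ cs.length)
    (h : ((cs.take t).reverse).take sepl.reverse.length = sepl.reverse) :
    sepl.length ≤ t := by
  have hl := congrArg List.length h
  simp [List.length_take] at hl
  omega

-- A's match test at position t (r = (cs.take t).reverse) means: an occurrence of sepl ends at t.
theorem matchTake_iff (cs sepl : List Char) (t : Nat) (ht : t ≤ cs.length) :
    (((cs.take t).reverse).take sepl.reverse.length = sepl.reverse)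
      ↔ (sepl.length ≤ t ∧ (cs.drop (t - sepl.length)).take sepl.length = sepl) := by
  constructor
  · intro h
    have hn := matchTake_len cs sepl t ht h
    refine ⟨hn, ?_⟩
    rw [List.length_reverse, matchTake_eq cs sepl t ht hn, List.reverse_inj] at h
    exact h
  · rintro ⟨hn, h⟩
    rw [List.length_reverse, matchTake_eq cs sepl t ht hn, List.reverse_inj]
    exact h

theorem scanSep (m : Int) (sepl cs : List Char) (sp : Int) (q : Nat) :
    ∀ p, q ≤ p → p ≤ cs.length →
      (∀ t, q < t → t ≤ p →
        ¬((m = -1 ∨ sp < m) ∧ ((cs.take t).reverse).take sepl.reverse.length = sepl.reverse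
            ∧ sepl.reverse ≠ [])) →
      ∀ cur res,
        aSep m sepl.reverse ((cs.take p).reverse) cur res sp
          = aSep m sepl.reverse ((cs.take q).reverse) (cur ++ ((cs.take p).drop q).reverse) res sp := by
  intro p hq
  induction p, hq using Nat.le_induction with
  | base =>
    intro _ _ cur res
    simp
  | succ p hqp ih =>
    intro hple hno cur res
    have hlt : p < cs.length := by omega
    have hr := take_rev_cons cs p hlt
    rw [hr, aSep]
    rw [dif_neg (by rw [← hr]; exact hno (p+1) (by omega) (by omega))]
    rw [ih (by omega) (fun t h1 h2 => hno t h1 (by omega)) (cur ++ [cs[p]'hlt]) res]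
    have hsplit : (cs.take (p+1)).drop q = (cs.take p).drop q ++ [cs[p]'hlt] := by
      rw [List.take_succ_eq_append_getElem hlt,
        List.drop_append_of_le_length (by simp [List.length_take]; omega)]
    rw [hsplit]
    simp

theorem mainS (m : Int) (cs sepl : List Char) (hsep : sepl ≠ []) :
    ∀ e, e ≤ cs.length → ∀ sp : Int,
      aSep m sepl.reverse ((cs.take e).reverse) [] [] sp = bSep m cs sepl e sp [] := by
  intro e
  induction e using Nat.strong_induction_on with
  | _ e ih =>
    intro hle sp
    have hn1 : 0 < sepl.length := List.length_pos_iff.mpr hsep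
    rw [bSep]
    by_cases hallow : m = -1 ∨ sp < m
    · simp only [if_pos hallow]
      rw [rfindFrom_eq cs sepl e hle]
      by_cases hex : ∃ k, k + sepl.length ≤ e ∧ (cs.drop k).take sepl.length = sepl
      · obtain ⟨k0, hk0⟩ := hex
        set K := Nat.findGreatest (fun k => k + sepl.length ≤ e ∧ (cs.drop k).take sepl.length = sepl) e with hK
        have hPK : K + sepl.length ≤ e ∧ (cs.drop K).take sepl.length = sepl := by
          have h := Nat.findGreatest_spec
            (P := fun k => k + sepl.length ≤ e ∧ (cs.drop k).take sepl.length = sepl)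
            (n := e) (by omega : k0 ≤ e) hk0
          rw [← hK] at h
          exact h
        have hKe : K ≤ e := Nat.findGreatest_le e
        have hgo : PySem.Chars.rfind.go (cs.take e) sepl e = (K : Int) := by
          apply go_pos _ _ K e hKe
          · exact (occ_prefix cs sepl K e hKe hle).mpr hPK
          · intro i hKi hie hpre
            have hocc := (occ_prefix cs sepl i e hie hle).mp hpre
            exact Nat.findGreatest_is_greatest hKi hie hocc
        rw [hgo]
        have htn : ((K : Int)).toNat = K := by omega
        rw [dif_pos (by refine ⟨by omega, ?_, hsep⟩; rw [htn]; omega)]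
        rw [htn]
        have hno : ∀ t, K + sepl.length < t → t ≤ e →
            ¬((m = -1 ∨ sp < m) ∧ ((cs.take t).reverse).take sepl.reverse.length = sepl.reverse
                ∧ sepl.reverse ≠ []) := by
          intro t h1 h2 hcond
          have hmt := (matchTake_iff cs sepl t (by omega)).mp hcond.2.1
          have hgr : ¬ (t - sepl.length + sepl.length ≤ e ∧
              (cs.drop (t - sepl.length)).take sepl.length = sepl) := by
            apply Nat.findGreatest_is_greatest
              (P := fun k => k + sepl.length ≤ e ∧ (cs.drop k).take sepl.length = sepl) (n := e)
            · rw [← hK]; omega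
            · omega
          exact hgr ⟨by omega, hmt.2⟩
        rw [scanSep m sepl cs sp (K + sepl.length) e (by omega) hle hno [] []]
        obtain ⟨c, rest, hcr⟩ : ∃ c rest, (cs.take (K + sepl.length)).reverse = c :: rest := by
          apply List.exists_cons_of_ne_nil
          apply List.ne_nil_of_length_pos
          simp [List.length_take]
          omega
        rw [hcr, aSep]
        rw [dif_pos (by
          refine ⟨hallow, ?_, by simp [hsep]⟩
          rw [← hcr]
          refine (matchTake_iff cs sepl (K + sepl.length) (by omega)).mpr ⟨by omega, ?_⟩
          rw [show K + sepl.length - sepl.length = K from by omega]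
          exact hPK.2)]
        have hdrop : (c :: rest).drop sepl.reverse.length = (cs.take K).reverse := by
          rw [← hcr, List.length_reverse, List.drop_reverse]
          rw [show (cs.take (K + sepl.length)).length = K + sepl.length from by
            simp [List.length_take]; omega]
          rw [show K + sepl.length - sepl.length = K from by omega, List.take_take]
          rw [Nat.min_eq_left (by omega)]
        rw [hdrop]
        rw [aSep_acc]
        rw [ih K (by omega) (by omega) (sp + 1)]
        conv_rhs => rw [bSep_acc]
        simp
      · push_neg at hex
        have hgo : PySem.Chars.rfind.go (cs.take e) sepl e = -1 := by
          apply go_neg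
          intro i hie hpre
          have hocc := (occ_prefix cs sepl i e hie hle).mp hpre
          exact hex i hocc.1 hocc.2
        rw [hgo]
        rw [dif_neg (by intro h; exact absurd h.1 (by norm_num))]
        have hno : ∀ t, 0 < t → t ≤ e →
            ¬((m = -1 ∨ sp < m) ∧ ((cs.take t).reverse).take sepl.reverse.length = sepl.reverse
                ∧ sepl.reverse ≠ []) := by
          intro t h1 h2 hcond
          have hmt := (matchTake_iff cs sepl t (by omega)).mp hcond.2.1
          exact hex (t - sepl.length) (by omega) hmt.2
        rw [scanSep m sepl cs sp 0 e (by omega) hle hno [] []]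
        simp only [List.take_zero, List.reverse_nil]
        rw [aSep]
        simp
    · simp only [if_neg hallow]
      rw [scanSep m sepl cs sp 0 e (by omega) hle (fun t h1 h2 hcond => hallow hcond.1) [] []]
      simp only [List.take_zero, List.reverse_nil]
      rw [aSep]
      simp

-- ===== VERDICT (by name: the statement is the Claim_ definition above) =====
theorem rsplit_spec : Claim_equal_rsplit := by
  intro s sep m _ _
  unfold Spec_rsplit
  cases sep with
  | none =>
    show aNone m s.toList.reverse [] [] 0 = (bNone m s.toList s.toList.length 0 []).reverse
    have h := mainN m s.toList s.toList.length le_rfl 0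
    rw [List.take_length] at h
    exact h
  | some sp =>
    by_cases hsp : sp.toList = []
    · simp [rsplit, rsplit_alt, hsp]
    · simp only [rsplit, rsplit_alt, if_neg hsp]
      by_cases hm0 : m = 0
      · subst hm0
        rw [if_pos rfl, bSep]
        rw [if_neg (by norm_num)]
        rw [List.take_length, String.ofList_toList]
        simp
      · rw [if_neg hm0]
        have h := mainS m s.toList sp.toList hsp s.toList.length le_rfl 0
        rw [List.take_length] at h
        exact h
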